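-- pv_equiv track=rewrite | github.com/ryandeng32/autoDoc | auto_helper.py | get_quote_type
-- ===== SOURCE A (Python) =====
-- def get_quote_type (line):
--     """Return the quote type used by a docstring given the starting line."""
--     quote_types = ['"""', "'''", '"', "'"]
--     curr_type = None
--     first_line = line.strip ()
--     for quote_type in quote_types:
--         if first_line.find (quote_type) == 0:
--             curr_type = quote_type
--             break
--     return curr_type
-- ===== SOURCE B (Python) =====
-- from itertools import takewhile
--
-- def get_quote_type(line):
--     """Return the quote type used by a docstring given the starting line."""
--     s = line.strip()
--     if not s or s[0] not in '"\'':
--         return None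
--     c = s[0]
--     # length of the leading run of c, capped at 3
--     run = sum(1 for _ in takewhile(lambda ch: ch == c, s[:3]))
--     return c * (3 if run >= 3 else 1)
-- ===== Notes on version B (the rewrite author's own statement) =====
-- stated objective: simpler
-- what changed: B measures the length of the leading run of the first quote character (capped at 3) and replicates that character run>=3 ? 3 : 1 times, instead of A's loop over a four-element list of candidate prefixes tested with find()==0; no prefix strings are compared at all.
import Mathlib
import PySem

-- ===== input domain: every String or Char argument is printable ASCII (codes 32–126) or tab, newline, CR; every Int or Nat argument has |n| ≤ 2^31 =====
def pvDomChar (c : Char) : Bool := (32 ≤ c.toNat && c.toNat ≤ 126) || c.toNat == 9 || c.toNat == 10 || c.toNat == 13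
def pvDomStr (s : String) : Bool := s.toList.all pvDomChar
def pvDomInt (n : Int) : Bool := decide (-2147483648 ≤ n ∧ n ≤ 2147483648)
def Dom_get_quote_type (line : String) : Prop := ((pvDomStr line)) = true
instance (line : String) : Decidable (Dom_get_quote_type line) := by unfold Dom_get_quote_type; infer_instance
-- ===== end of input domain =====

-- B counts the leading run of the stripped line's first quote character (capped at 3) and replicates
-- that character run>=3 ? 3 : 1 times, instead of A's loop over four candidate prefixes with find()==0;
-- objective: simpler.

-- ===== PORT A =====
-- the for-loop with break over quote_types, returning the first prefix match
def pvA_loop (first_line : String) : List String → Option String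
  | [] => none
  | qt :: rest => if PySem.Str.find first_line qt = 0 then some qt else pvA_loop first_line rest

def get_quote_type (line : String) : Option String :=
  pvA_loop (PySem.Str.strip line) ["\"\"\"", "'''", "\"", "'"]

-- ===== PORT B =====
def get_quote_type_alt (line : String) : Option String :=
  match (PySem.Str.strip line).toList with
  | [] => none
  | c :: rest =>
    if c = '"' ∨ c = '\'' then
      let run := (((c :: rest).take 3).takeWhile (fun ch => ch = c)).length
      some (String.ofList (List.replicate (if run ≥ 3 then 3 else 1) c))
    else none

-- ===== PRECONDITION & SPEC =====
def Spec_get_quote_type (line : String) (out : Option String) : Prop := out = get_quote_type_alt line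
instance (line : String) (out : Option String) : Decidable (Spec_get_quote_type line out) := by unfold Spec_get_quote_type; infer_instance

-- ===== CLAIM (what is proved, stated in full; the proofs are below) =====
def Claim_equal_get_quote_type : Prop := ∀ (line : String), Dom_get_quote_type line → Spec_get_quote_type line (get_quote_type line)

-- ===== LEMMAS AND PROOFS =====

theorem pv_find_eq_zero_iff (l sub : List Char) (_h : sub ≠ []) :
    PySem.Chars.find l sub = 0 ↔ sub <+: l := by
  constructor
  · intro h0
    have hs := PySem.Chars.find_spec (le_of_eq h0.symm)
    simpa [h0] using hs.1
  · intro hp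
    have hge : 0 ≤ PySem.Chars.find l sub :=
      (PySem.Chars.find_nonneg_iff l sub).mpr hp.isInfix
    have hs := PySem.Chars.find_spec hge
    by_contra hne
    have hpos : 0 < (PySem.Chars.find l sub).toNat := by omega
    exact (hs.2 0 hpos) (by simpa using hp)

theorem pv_core (s : String) :
    pvA_loop s ["\"\"\"", "'''", "\"", "'"] =
      (match s.toList with
      | [] => none
      | c :: rest =>
        if c = '"' ∨ c = '\'' then
          let run := (((c :: rest).take 3).takeWhile (fun ch => ch = c)).length
          some (String.ofList (List.replicate (if run ≥ 3 then 3 else 1) c))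
        else none) := by
  have e3 : ∀ (a b c : Char) (s : List Char), PySem.Chars.find s [a,b,c] = 0 ↔ [a,b,c] <+: s :=
    fun a b c s => pv_find_eq_zero_iff s [a,b,c] (by simp)
  have e1 : ∀ (a : Char) (s : List Char), PySem.Chars.find s [a] = 0 ↔ [a] <+: s :=
    fun a s => pv_find_eq_zero_iff s [a] (by simp)
  simp only [pvA_loop, PySem.Str.find_eq, e3, e1]
  generalize s.toList = l
  match l with
  | [] => simp [e3, e1, List.cons_prefix_cons]
  | c :: rest =>
    by_cases hq : c = '"'
    · subst hq
      match rest with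
      | [] => simp [e3, e1, List.cons_prefix_cons, List.takeWhile, String.ofList] <;> rfl
      | d :: rest2 =>
        match rest2 with
        | [] =>
          by_cases hd : d = '"' <;>
            simp [e3, e1, List.cons_prefix_cons, hd, List.takeWhile, String.ofList] <;> rfl
        | e :: rest3 =>
          by_cases hd : d = '"' <;> by_cases he : e = '"' <;>
            simp [e3, e1, List.cons_prefix_cons, hd, he, eq_comm, List.takeWhile, String.ofList] <;> rfl
    · by_cases hq' : c = '\''
      · subst hq'
        match rest with
        | [] => simp [e3, e1, List.cons_prefix_cons, List.takeWhile, String.ofList] <;> rfl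
        | d :: rest2 =>
          match rest2 with
          | [] =>
            by_cases hd : d = '\'' <;>
              simp [e3, e1, List.cons_prefix_cons, hd, List.takeWhile, String.ofList] <;> rfl
          | e :: rest3 =>
            by_cases hd : d = '\'' <;> by_cases he : e = '\'' <;>
              simp [e3, e1, List.cons_prefix_cons, hd, he, eq_comm, List.takeWhile, String.ofList] <;> rfl
      · simp [e3, e1, List.cons_prefix_cons, hq, hq', eq_comm]

-- ===== VERDICT (by name: the statement is the Claim_ definition above) =====
theorem get_quote_type_spec : Claim_equal_get_quote_type := by
  intro line _
  unfold Spec_get_quote_type get_quote_type get_quote_type_alt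
  exact pv_core (PySem.Str.strip line)
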